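-- pv_equiv track=rewrite | github.com/ShreySumariya07/IS_PRAC | exp13.py | changeCharPositionToLeft
-- ===== SOURCE A (Python) =====
-- def changeCharPositionToLeft(inter_text, digit):
--     some_text = []
--     i = digit - 1
--     while i < len(inter_text):
--         some_text.append(inter_text[i])
--         i = i + digit
--     first = some_text[0]
--     i = 1
--     while len(some_text) > 1 and i < len(some_text):
--         some_text[i-1] = some_text[i]
--         i = i+1
--     some_text[len(some_text)-1] = first
--     i = digit - 1
--     k = 0
--     while i < len(inter_text):
--         inter_text[i] = some_text[k]
--         i = i + digit
--         k = k + 1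
--     return inter_text
-- ===== SOURCE B (Python) =====
-- def changeCharPositionToLeft(inter_text, digit):
--     positions = []
--     i = digit - 1
--     while i < len(inter_text):
--         positions.append(i)
--         i = i + digit
--     first = inter_text[positions[0]]
--     for p, q in zip(positions, positions[1:]):
--         inter_text[p] = inter_text[q]
--     inter_text[positions[-1]] = first
--     return inter_text
-- ===== Notes on version B (the rewrite author's own statement) =====
-- stated objective: simpler
-- what changed: B collects the selected indices (not a copy of the values), rotates in place by writing each selected slot from the next selected slot via zip over adjacent index pairs, then writes the saved first value into the last slot, replacing A's value-copy list, its element-by-element shift loop and its counter-driven write-back loop.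
-- outside the precondition, e.g. on changeCharPositionToLeft(['a', 'b'], 5): A raises IndexError, B raises IndexError
import Mathlib
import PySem

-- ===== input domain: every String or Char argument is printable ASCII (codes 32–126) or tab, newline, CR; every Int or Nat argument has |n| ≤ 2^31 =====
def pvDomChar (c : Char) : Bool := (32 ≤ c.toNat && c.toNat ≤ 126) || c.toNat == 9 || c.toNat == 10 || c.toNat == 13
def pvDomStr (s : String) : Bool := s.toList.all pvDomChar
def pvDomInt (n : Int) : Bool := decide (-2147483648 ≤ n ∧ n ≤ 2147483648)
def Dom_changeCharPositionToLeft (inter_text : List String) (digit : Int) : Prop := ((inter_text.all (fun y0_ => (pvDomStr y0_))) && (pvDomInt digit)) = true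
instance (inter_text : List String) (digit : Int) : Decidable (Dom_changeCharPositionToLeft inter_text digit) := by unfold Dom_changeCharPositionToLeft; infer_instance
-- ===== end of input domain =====

-- B replaces A's value-copy list, shift loop and counter-driven write-back by an index list and one
-- in-place rotation over adjacent index pairs (objective: simpler). In Python both A and B mutate
-- inter_text in place and return it; the theorems below are about the returned value.

-- ===== PORT A =====
-- first while loop: some_text.append(inter_text[i]); i += digit
-- (the '0 < digit' guard only totalises the recursion: for digit ≤ 0 the Python loop never ends)
def aCollect (xs : List String) (digit i : Int) : List String :=
  if _h : 0 < digit ∧ i < (xs.length : Int) then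
    PySem.List.pyGetD xs i "" :: aCollect xs digit (i + digit)
  else []
  termination_by ((xs.length : Int) - i).toNat
  decreasing_by omega

-- second while loop: some_text[i-1] = some_text[i]; i += 1
def aShift (s : List String) (i : Int) : List String :=
  if _h : 1 < s.length ∧ i < (s.length : Int) then
    aShift (PySem.List.pySetD s (i - 1) (PySem.List.pyGetD s i "")) (i + 1)
  else s
  termination_by ((s.length : Int) - i).toNat
  decreasing_by simp [PySem.List.length_pySetD]; omega

-- third while loop: inter_text[i] = some_text[k]; i += digit; k += 1
def aWrite (xs s : List String) (digit i k : Int) : List String :=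
  if _h : 0 < digit ∧ i < (xs.length : Int) then
    aWrite (PySem.List.pySetD xs i (PySem.List.pyGetD s k "")) s digit (i + digit) (k + 1)
  else xs
  termination_by ((xs.length : Int) - i).toNat
  decreasing_by simp [PySem.List.length_pySetD]; omega

def changeCharPositionToLeft (inter_text : List String) (digit : Int) : List String :=
  let some_text := aCollect inter_text digit (digit - 1)
  let first := PySem.List.pyGetD some_text 0 ""            -- some_text[0] (IndexError when empty: Pre_)
  let s2 := aShift some_text 1
  let s3 := PySem.List.pySetD s2 ((s2.length : Int) - 1) first   -- some_text[len(some_text)-1] = first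
  aWrite inter_text s3 digit (digit - 1) 0

-- ===== PORT B =====
-- positions-collecting while loop (same totalising guard; for digit ≤ 0 the Python loop never ends)
def bPositions (n digit i : Int) : List Int :=
  if _h : 0 < digit ∧ i < n then i :: bPositions n digit (i + digit) else []
  termination_by (n - i).toNat
  decreasing_by omega

def changeCharPositionToLeft_alt (inter_text : List String) (digit : Int) : List String :=
  let positions := bPositions (inter_text.length : Int) digit (digit - 1)
  let first := PySem.List.pyGetD inter_text (PySem.List.pyGetD positions 0 0) ""   -- inter_text[positions[0]]
  let rotated := (positions.zip (positions.drop 1)).foldl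
    (fun acc pq => PySem.List.pySetD acc pq.1 (PySem.List.pyGetD acc pq.2 "")) inter_text
  PySem.List.pySetD rotated (PySem.List.pyGetD positions (-1) 0) first             -- inter_text[positions[-1]] = first

-- ===== PRECONDITION & SPEC =====
-- Pre_ excludes digit ≤ 0 (A's first while loop never terminates) and digit > len(inter_text)
-- (no character selected: some_text[0] raises IndexError in A, as positions[0] does in B).
def Pre_changeCharPositionToLeft (inter_text : List String) (digit : Int) : Prop :=
  1 ≤ digit ∧ digit ≤ (inter_text.length : Int)
instance (inter_text : List String) (digit : Int) : Decidable (Pre_changeCharPositionToLeft inter_text digit) := by unfold Pre_changeCharPositionToLeft; infer_instance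

def pvWitness_changeCharPositionToLeft : List String × Int := (["a", "b", "c", "d", "e"], 2)

def Spec_changeCharPositionToLeft (inter_text : List String) (digit : Int) (out : List String) : Prop := out = changeCharPositionToLeft_alt inter_text digit
instance (inter_text : List String) (digit : Int) (out : List String) : Decidable (Spec_changeCharPositionToLeft inter_text digit out) := by unfold Spec_changeCharPositionToLeft; infer_instance

-- ===== CLAIM (what is proved, stated in full; the proofs are below) =====
def Claim_equal_changeCharPositionToLeft : Prop := ∀ (inter_text : List String) (digit : Int), Dom_changeCharPositionToLeft inter_text digit → Pre_changeCharPositionToLeft inter_text digit → Spec_changeCharPositionToLeft inter_text digit (changeCharPositionToLeft inter_text digit)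

-- ===== LEMMAS AND PROOFS =====

-- sequential writes: the common normal form both sides are reduced to
def writeL (xs : List String) (w : List (Int × String)) : List String :=
  w.foldl (fun acc pv => PySem.List.pySetD acc pv.1 pv.2) xs

theorem bPositions_mem {n d i x : Int} (hx : x ∈ bPositions n d i) : i ≤ x ∧ x < n := by
  induction i using bPositions.induct (n := n) (digit := d) with
  | case1 i h ih =>
    rw [bPositions, dif_pos h] at hx
    rcases List.mem_cons.mp hx with rfl | hx'
    · omega
    · have := ih hx'; omega
  | case2 i h =>
    rw [bPositions, dif_neg h] at hx
    simp at hx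

theorem bPositions_pairwise (n d i : Int) : (bPositions n d i).Pairwise (· < ·) := by
  induction i using bPositions.induct (n := n) (digit := d) with
  | case1 i h ih =>
    rw [bPositions, dif_pos h]
    exact List.pairwise_cons.mpr ⟨fun x hx => by have := bPositions_mem hx; omega, ih⟩
  | case2 i h => rw [bPositions, dif_neg h]; exact List.Pairwise.nil

theorem aCollect_eq_map (xs : List String) (d i : Int) :
    aCollect xs d i = (bPositions (xs.length : Int) d i).map (fun p => PySem.List.pyGetD xs p "") := by
  induction i using bPositions.induct (n := (xs.length : Int)) (digit := d) with
  | case1 i h ih => rw [bPositions, dif_pos h, aCollect, dif_pos h, List.map_cons, ih]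
  | case2 i h => rw [bPositions, dif_neg h, aCollect, dif_neg h, List.map_nil]

theorem take_succ_set_pre (s : List String) (j : Nat) (v : String) (h : j < s.length) :
    (s.set j v).take (j+1) = s.take j ++ [v] := by
  apply List.ext_getElem
  · simp; omega
  · intro k hk1 hk2
    simp only [List.getElem_take, List.getElem_set]
    by_cases hkj : k = j
    · subst hkj; simp [List.getElem_append_right]
    · have hkj' : k < j := by simp at hk1; omega
      have hks : k < s.length := by omega
      rw [List.getElem_append_left (by simp; omega : k < (s.take j).length)]
      simp [List.getElem_take]
      omega

theorem take_set' (s : List String) (j : Nat) (v : String) (h1 : 1 ≤ j) (h2 : j ≤ s.length) :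
    (s.set (j-1) v).take j = s.take (j-1) ++ [v] := by
  obtain ⟨k, rfl⟩ : ∃ k, j = k + 1 := ⟨j - 1, by omega⟩
  simpa using take_succ_set_pre s k v (by omega)

theorem drop_set_lt (s : List String) (j m : Nat) (v : String) (h : j < m) :
    (s.set j v).drop m = s.drop m := by
  apply List.ext_getElem
  · simp
  · intro k hk1 hk2
    simp [List.getElem_drop, List.getElem_set]
    omega

theorem getLast?_set_lt (s : List String) (j : Nat) (v : String) (h : j < s.length - 1) :
    (s.set j v).getLast? = s.getLast? := by
  rw [List.getLast?_eq_getElem?, List.getLast?_eq_getElem?]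
  simp [List.getElem?_set_ne (by omega : j ≠ s.length - 1)]

theorem aShift_spec (m : Nat) : ∀ (s : List String) (i : Int), 1 < s.length → 1 ≤ i →
    i ≤ (s.length : Int) → ((s.length : Int) - i).toNat = m →
    aShift s i = s.take (i.toNat - 1) ++ s.drop i.toNat ++ [s.getLast?.getD ""] := by
  induction m with
  | zero =>
    intro s i h1 hi hle hm
    have : i = (s.length : Int) := by omega
    subst this
    rw [aShift, dif_neg (by omega)]
    have hne : s ≠ [] := by intro h; subst h; simp at h1
    rw [show (s.length:Int).toNat = s.length by omega]
    rw [List.drop_length, List.getLast?_eq_some_getLast hne]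
    simp only [Option.getD_some]
    rw [← List.dropLast_eq_take]
    simp [List.dropLast_append_getLast hne]
  | succ m ih =>
    intro s i h1 hi hle hm
    have hlt : i < (s.length : Int) := by omega
    rw [aShift, dif_pos ⟨h1, hlt⟩]
    set j : Nat := i.toNat with hj
    have hji : i = (j : Int) := by omega
    have hj1 : 1 ≤ j := by omega
    have hjlen : j < s.length := by omega
    have hv : PySem.List.pyGetD s i "" = s[j] := by
      rw [PySem.List.pyGetD_eq_getElem s "" (by omega) (by omega)]
    have hset : PySem.List.pySetD s (i - 1) (PySem.List.pyGetD s i "") = s.set (j-1) s[j] := by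
      rw [PySem.List.pySetD_of_nonneg _ _ (by omega), hv]
      congr 1
      omega
    rw [hset]
    set s' := s.set (j-1) s[j] with hs'
    have hlen' : s'.length = s.length := by simp [hs']
    rw [ih s' (i+1) (by omega) (by omega) (by simp [hlen']; omega) (by simp [hlen']; omega)]
    have h1j : (i+1).toNat - 1 = j := by omega
    have h2j : (i+1).toNat = j + 1 := by omega
    rw [h1j, h2j, hs']
    rw [take_set' s j _ (by omega) (by omega)]
    rw [drop_set_lt s (j-1) (j+1) _ (by omega)]
    rw [getLast?_set_lt s (j-1) _ (by omega)]
    rw [List.drop_eq_getElem_cons hjlen]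
    simp

theorem set_last_append (t : List String) (x y : String) :
    (t ++ [x]).set t.length y = t ++ [y] := by
  induction t with
  | nil => simp
  | cons a t ih => simp [List.set_cons_succ, ih]

theorem shift_set (s : List String) (hne : s ≠ []) (first : String) :
    PySem.List.pySetD (aShift s 1) (((aShift s 1).length : Int) - 1) first = s.tail ++ [first] := by
  have hlen : 0 < s.length := List.length_pos_of_ne_nil hne
  by_cases h1 : 1 < s.length
  · rw [aShift_spec (((s.length : Int)) - 1).toNat s 1 h1 (by omega) (by omega) rfl]
    simp only [Int.toNat_one]
    have hdl : (s.drop 1).length = s.length - 1 := by simp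
    rw [List.take_zero, List.nil_append]
    rw [PySem.List.pySetD_of_nonneg _ _ (by simp)]
    have hlen2 : ((s.drop 1 ++ [s.getLast?.getD ""]).length : Int) = (s.length : Int) := by simp; omega
    rw [hlen2]
    have : ((s.length : Int) - 1).toNat = (s.drop 1).length := by omega
    rw [this, set_last_append]
    rw [← List.drop_one]
  · have hl1 : s.length = 1 := by omega
    rw [aShift, dif_neg (by omega)]
    rw [PySem.List.pySetD_of_nonneg _ _ (by omega)]
    obtain ⟨a, rfl⟩ : ∃ a, s = [a] := by
      cases s with
      | nil => simp at hlen
      | cons a t => cases t with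
        | nil => exact ⟨a, rfl⟩
        | cons b u => simp at hl1
    simp

theorem aWrite_eq (n : Nat) (s : List String) (d : Int) :
    ∀ (i : Int) (xs : List String) (k : Int), xs.length = n → 0 ≤ k →
    k + ((bPositions (n : Int) d i).length : Int) ≤ (s.length : Int) →
    aWrite xs s d i k = writeL xs ((bPositions (n : Int) d i).zip (s.drop k.toNat)) := by
  intro i
  induction i using bPositions.induct (n := (n : Int)) (digit := d) with
  | case1 i h ih =>
    intro xs k hn hk hlen
    rw [bPositions, dif_pos h] at hlen ⊢
    rw [aWrite, dif_pos (by omega)]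
    have hks : k.toNat < s.length := by simp at hlen; omega
    rw [List.drop_eq_getElem_cons hks, List.zip_cons_cons]
    have hv : PySem.List.pyGetD s k "" = s[k.toNat] := by
      rw [PySem.List.pyGetD_eq_getElem s "" hk (by omega)]
    rw [writeL, List.foldl_cons, hv]
    have := ih (PySem.List.pySetD xs i s[k.toNat]) (k + 1)
      (by rw [PySem.List.length_pySetD]; exact hn) (by omega) (by simp at hlen ⊢; omega)
    rw [show (k+1).toNat = k.toNat + 1 by omega] at this
    rw [this]
    rfl
  | case2 i h =>
    intro xs k hn hk hlen
    rw [bPositions, dif_neg h]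
    rw [aWrite, dif_neg (by omega)]
    simp [writeL]

theorem pyGetD_pySetD_ne (acc : List String) {p r : Int} (v d : String)
    (hp : 0 ≤ p) (hr : 0 ≤ r) (hne : p ≠ r) :
    PySem.List.pyGetD (PySem.List.pySetD acc p v) r d = PySem.List.pyGetD acc r d := by
  rw [PySem.List.pySetD_of_nonneg _ _ hp,
      PySem.List.pyGetD_of_nonneg _ _ hr, PySem.List.pyGetD_of_nonneg _ _ hr]
  have : p.toNat ≠ r.toNat := by omega
  simp [List.getD, List.getElem?_set_ne this]

theorem bFold_eq (xs0 : List String) (ps : List Int) :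
    ∀ (acc : List String), ps.Pairwise (· < ·) → (∀ r ∈ ps, 0 ≤ r) →
    (∀ r ∈ ps.drop 1, PySem.List.pyGetD acc r "" = PySem.List.pyGetD xs0 r "") →
    (ps.zip (ps.drop 1)).foldl (fun acc pq => PySem.List.pySetD acc pq.1 (PySem.List.pyGetD acc pq.2 "")) acc
      = writeL acc (ps.zip ((ps.drop 1).map (fun q => PySem.List.pyGetD xs0 q ""))) := by
  induction ps with
  | nil => intro acc _ _ _; simp [writeL]
  | cons p rest ih =>
    intro acc hpw hb hread
    cases rest with
    | nil => simp [writeL]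
    | cons q rest' =>
      simp only [List.drop_one, List.tail_cons, List.zip_cons_cons, List.foldl_cons, List.map_cons]
      rw [hread q (by simp)]
      rw [writeL, List.foldl_cons]
      have hpw' := List.pairwise_cons.mp hpw
      refine (ih (PySem.List.pySetD acc p (PySem.List.pyGetD xs0 q "")) hpw'.2
        (fun r hr => hb r (List.mem_cons_of_mem _ hr)) ?_).trans ?_
      · intro r hr
        have hrmem : r ∈ q :: rest' := by
          rw [List.drop_one, List.tail_cons] at hr
          exact List.mem_cons_of_mem _ hr
        rw [pyGetD_pySetD_ne acc _ _ (hb p (by simp)) (hb r (List.mem_cons_of_mem _ hrmem))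
          (by have := hpw'.1 r hrmem; omega)]
        exact hread r (by simpa using hrmem)
      · rfl

theorem zip_truncate {α β : Type} (u : List α) (t : List β) :
    u.zip t = (u.take t.length).zip t := by
  induction u generalizing t with
  | nil => simp
  | cons a u ih =>
    cases t with
    | nil => simp
    | cons b t => simp [List.zip_cons_cons, ih]

theorem pyGetD_neg_one (l : List Int) (hne : l ≠ []) (d : Int) :
    PySem.List.pyGetD l (-1) d = l.getLast (by simpa using hne) := by
  have h0 : 0 < l.length := List.length_pos_of_ne_nil hne
  unfold PySem.List.pyGetD PySem.List.pyGet? PySem.List.pyIdx?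
  rw [if_neg (by omega), if_pos (by omega : -(l.length:Int) ≤ -1)]
  have : (-(-1:Int)).toNat = 1 := by omega
  rw [this]; simp [List.getLast_eq_getElem]; rw [List.getElem?_eq_getElem (by omega)]; simp

theorem zip_snoc (u : List Int) (t : List String) (y : String) (h : u ≠ [])
    (hl : u.length = t.length + 1) :
    u.zip (t ++ [y]) = u.dropLast.zip t ++ [(u.getLast h, y)] := by
  conv_lhs => rw [← List.dropLast_append_getLast h]
  rw [List.zip_append (by simp [List.length_dropLast]; omega)]
  simp

theorem main_eq (xs : List String) (d : Int) (h1 : 1 ≤ d) (h2 : d ≤ (xs.length : Int)) :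
    changeCharPositionToLeft xs d = changeCharPositionToLeft_alt xs d := by
  have hguard : 0 < d ∧ d - 1 < (xs.length : Int) := ⟨by omega, by omega⟩
  have hps : bPositions (xs.length : Int) d (d-1)
      = (d-1) :: bPositions (xs.length : Int) d (d-1+d) := by
    rw [bPositions, dif_pos hguard]
  set f : Int → String := fun p => PySem.List.pyGetD xs p "" with hf
  set ps : List Int := bPositions (xs.length : Int) d (d-1) with hpsdef
  have hne : ps ≠ [] := by rw [hps]; simp
  have hb : ∀ r ∈ ps, 0 ≤ r := fun r hr => by have := bPositions_mem hr; omega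
  have hpw : ps.Pairwise (· < ·) := bPositions_pairwise _ _ _
  have hlen1 : 1 ≤ ps.length := by rw [hps]; simp
  have hlmap : ((ps.drop 1).map f).length = ps.length - 1 := by simp
  have hsel : aCollect xs d (d-1) = ps.map f := aCollect_eq_map xs d (d-1)
  have hselne : ps.map f ≠ [] := by simp [hne]
  have hfirstA : PySem.List.pyGetD (ps.map f) 0 "" = f (d-1) := by
    rw [PySem.List.pyGetD_of_nonneg _ _ (by norm_num), hps]; simp
  have htail : (ps.map f).tail = (ps.drop 1).map f := by
    simp [← List.drop_one]
  have hzip : ps.zip ((ps.drop 1).map f) = ps.dropLast.zip ((ps.drop 1).map f) := by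
    rw [zip_truncate, hlmap, ← List.dropLast_eq_take]
  have hA : changeCharPositionToLeft xs d
      = PySem.List.pySetD (writeL xs (ps.dropLast.zip ((ps.drop 1).map f)))
          (ps.getLast hne) (f (d-1)) := by
    unfold changeCharPositionToLeft
    simp only [hsel, hfirstA]
    rw [shift_set _ hselne, htail]
    rw [aWrite_eq xs.length _ d (d-1) xs 0 rfl (by norm_num) (by simp [← hpsdef]; omega)]
    rw [show ((0:Int).toNat) = 0 from rfl, List.drop_zero, ← hpsdef]
    rw [zip_snoc ps _ _ hne (by simp; omega)]
    rw [writeL, List.foldl_append]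
    simp [writeL]
  have hB : changeCharPositionToLeft_alt xs d
      = PySem.List.pySetD (writeL xs (ps.dropLast.zip ((ps.drop 1).map f)))
          (ps.getLast hne) (f (d-1)) := by
    have hp0 : PySem.List.pyGetD ps 0 0 = d - 1 := by
      rw [PySem.List.pyGetD_of_nonneg _ _ (by norm_num), hps]; simp
    unfold changeCharPositionToLeft_alt
    simp only [← hpsdef, hp0, pyGetD_neg_one ps hne]
    rw [bFold_eq xs ps xs hpw hb (fun r _ => rfl)]
    rw [hzip]
  rw [hA, hB]

-- ===== VERDICT (by name: the statement is the Claim_ definition above) =====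
theorem changeCharPositionToLeft_spec : Claim_equal_changeCharPositionToLeft := by
  intro xs d _ hpre
  exact main_eq xs d hpre.1 hpre.2
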